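-- pv_equiv track=rewrite | github.com/AndrewDeSimone/Advent-Of-Code-2023 | Day 12/star1/main.py | legalRow
-- ===== SOURCE A (Python) =====
-- def legalRow(row, rule):
--     rule = rule.copy()
--     row = row.copy()
--     row = ''.join(row)
--     row = row.split('.')
--     while '' in row:
--         row.remove('')
--     if len(row) != len(rule):
--         return int(False)
--     while len(rule) != 0:
--         if len(row.pop()) != rule.pop():
--             return int(False)
--     return int(True)
-- ===== SOURCE B (Python) =====
-- def legalRow(row, rule):
--     runs = []
--     cur = 0
--     for ch in ''.join(row):
--         if ch == '.':
--             if cur != 0: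
--                 runs.append(cur)
--             cur = 0
--         else:
--             cur += 1
--     if cur != 0:
--         runs.append(cur)
--     return int(runs == list(rule))
-- ===== Notes on version B (the rewrite author's own statement) =====
-- stated objective: simpler
-- what changed: Replaces split('.')/repeated-remove('')/destructive twin-pop back-to-front comparison with one forward accumulator scan over the joined string that builds the run-length list directly and compares it to the rule with ==.
import Mathlib
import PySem

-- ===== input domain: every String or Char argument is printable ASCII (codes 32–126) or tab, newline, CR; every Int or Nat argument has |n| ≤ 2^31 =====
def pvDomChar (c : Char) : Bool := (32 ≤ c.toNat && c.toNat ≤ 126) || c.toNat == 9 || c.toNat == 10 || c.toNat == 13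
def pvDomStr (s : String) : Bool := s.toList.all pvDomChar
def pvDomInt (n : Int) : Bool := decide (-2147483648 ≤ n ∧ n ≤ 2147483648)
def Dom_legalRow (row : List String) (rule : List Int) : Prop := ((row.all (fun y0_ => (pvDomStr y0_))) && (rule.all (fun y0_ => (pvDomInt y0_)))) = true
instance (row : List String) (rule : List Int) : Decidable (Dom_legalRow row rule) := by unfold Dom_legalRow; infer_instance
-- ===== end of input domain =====

-- B replaces A's split('.')/repeated-remove('')/destructive twin-pop comparison with a
-- single forward run-length scan over the joined string, compared to the rule with == (simpler).


-- ===== PORT A =====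
-- while '' in row: row.remove('')
def removeEmpties (xs : List String) : List String :=
  match h : PySem.List.remove? xs "" with
  | some ys => removeEmpties ys
  | none => xs
termination_by xs.length
decreasing_by
  have hm : "" ∈ xs := by
    by_contra hnm
    rw [(PySem.List.remove?_eq_none_iff xs "").mpr hnm] at h
    cases h
  rw [PySem.List.remove?_eq_some_erase xs "" hm] at h
  have hpos := List.length_pos_of_mem hm
  have := List.length_erase_of_mem hm
  have hys : xs.erase "" = ys := Option.some.inj h
  subst hys
  omega

-- while len(rule) != 0: if len(row.pop()) != rule.pop(): return 0
def popLoopA (row : List String) (rule : List Int) : Int :=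
  match hr : PySem.List.pop? rule with
  | none => 1
  | some (r, rule') =>
    match PySem.List.pop? row with
    | none => 0  -- unreachable inside legalRow (guarded by the length check; Python would raise IndexError)
    | some (x, row') => if PySem.Str.len x ≠ r then 0 else popLoopA row' rule'
termination_by rule.length
decreasing_by
  have h2 := PySem.List.length_of_pop?_eq_some rule hr
  simp at h2
  omega

def legalRow (row : List String) (rule : List Int) : Int :=
  let joined := PySem.Str.join "" row
  -- sep "." is a nonempty literal, so split? is always `some`; getD only strips the `some`
  let parts := (PySem.Str.split? joined ".").getD []
  let parts := removeEmpties parts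
  if parts.length ≠ rule.length then 0
  else popLoopA parts rule

-- ===== PORT B =====
def scanStep (st : List Int × Int) (ch : Char) : List Int × Int :=
  if ch = '.' then (if st.2 ≠ 0 then st.1 ++ [st.2] else st.1, 0)
  else (st.1, st.2 + 1)

def legalRow_alt (row : List String) (rule : List Int) : Int :=
  let st := (PySem.Str.join "" row).toList.foldl scanStep ([], 0)
  let runs := if st.2 ≠ 0 then st.1 ++ [st.2] else st.1
  if runs = rule then 1 else 0

-- ===== PRECONDITION & SPEC =====
def Spec_legalRow (row : List String) (rule : List Int) (out : Int) : Prop := out = legalRow_alt row rule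
instance (row : List String) (rule : List Int) (out : Int) : Decidable (Spec_legalRow row rule out) := by unfold Spec_legalRow; infer_instance

-- ===== CLAIM (what is proved, stated in full; the proofs are below) =====
def Claim_equal_legalRow : Prop := ∀ (row : List String) (rule : List Int), Dom_legalRow row rule → Spec_legalRow row rule (legalRow row rule)

-- ===== LEMMAS AND PROOFS =====

-- structural form of s.split('.') on char lists
def split1 : List Char → List (List Char)
  | [] => [[]]
  | c :: r =>
    match split1 r with
    | [] => [[c]]
    | h :: t => if c = '.' then [] :: h :: t else (c :: h) :: t

def consHead (p : List Char) : List (List Char) → List (List Char)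
  | [] => [p]
  | h :: t => (p ++ h) :: t

theorem split1_ne_nil (cs : List Char) : split1 cs ≠ [] := by
  cases cs with
  | nil => simp [split1]
  | cons c r =>
    simp only [split1]
    cases h : split1 r with
    | nil => simp
    | cons h t => split_ifs <;> simp

theorem go_eq (fuel : Nat) : ∀ (l cur : List Char) (acc : List (List Char)), l.length ≤ fuel →
    PySem.Chars.splitOn.go ['.'] fuel l cur acc = acc.reverse ++ consHead cur.reverse (split1 l) := by
  induction fuel with
  | zero =>
    intro l cur acc h
    have : l = [] := by cases l <;> simp_all
    subst this
    simp [PySem.Chars.splitOn.go, split1, consHead]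
  | succ fuel ih =>
    intro l cur acc h
    cases l with
    | nil => simp [PySem.Chars.splitOn.go, split1, consHead]
    | cons c rest =>
      by_cases hc : c = '.'
      · subst hc
        rw [show PySem.Chars.splitOn.go ['.'] (fuel+1) ('.' :: rest) cur acc
              = PySem.Chars.splitOn.go ['.'] fuel rest [] (cur.reverse :: acc) by
            simp [PySem.Chars.splitOn.go, List.isPrefixOf]]
        rw [ih rest [] (cur.reverse :: acc) (by simp at h; omega)]
        simp only [split1]
        cases hs : split1 rest with
        | nil => exact absurd hs (split1_ne_nil rest)
        | cons hh tt => simp [consHead]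
      · rw [show PySem.Chars.splitOn.go ['.'] (fuel+1) (c :: rest) cur acc
              = PySem.Chars.splitOn.go ['.'] fuel rest (c :: cur) acc by
            simp only [PySem.Chars.splitOn.go, List.isPrefixOf]
            simp
            intro h'
            exact absurd h'.symm hc]
        rw [ih rest (c :: cur) acc (by simp at h; omega)]
        simp only [split1]
        cases hs : split1 rest with
        | nil => exact absurd hs (split1_ne_nil rest)
        | cons hh tt => simp [consHead, hc]

theorem splitOn_eq_split1 (cs : List Char) : PySem.Chars.splitOn cs ['.'] = split1 cs := by
  rw [PySem.Chars.splitOn, go_eq (cs.length + 1) cs [] [] (by omega)]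
  cases hs : split1 cs with
  | nil => exact absurd hs (split1_ne_nil cs)
  | cons h t => simp [consHead]

theorem filter_erase_empty (xs : List String) : (xs.erase "").filter (· ≠ "") = xs.filter (· ≠ "") := by
  induction xs with
  | nil => simp
  | cons x t ihx =>
    by_cases hx : x = ""
    · subst hx; simp [List.erase_cons]
    · rw [List.erase_cons_tail (by simp [hx])]
      simp only [List.filter_cons]
      rw [ihx]

theorem removeEmpties_eq (xs : List String) : removeEmpties xs = xs.filter (· ≠ "") := by
  rw [removeEmpties]
  split
  · next ys h =>
    have hm : "" ∈ xs := by
      by_contra hnm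
      rw [(PySem.List.remove?_eq_none_iff xs "").mpr hnm] at h
      cases h
    rw [PySem.List.remove?_eq_some_erase xs "" hm] at h
    have hys : xs.erase "" = ys := Option.some.inj h
    subst hys
    rw [removeEmpties_eq (xs.erase ""), filter_erase_empty]
  · next h =>
    have hnm : "" ∉ xs := (PySem.List.remove?_eq_none_iff xs "").mp h
    rw [List.filter_eq_self.mpr]
    intro a ha
    simp only [decide_eq_true_eq]
    rintro rfl
    exact hnm ha
termination_by xs.length
decreasing_by
  have hpos := List.length_pos_of_mem hm
  have := List.length_erase_of_mem hm
  omega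

theorem popLoopA_eq : ∀ (rule : List Int) (row : List String), row.length = rule.length →
    popLoopA row rule = if row.map PySem.Str.len = rule then 1 else 0 := by
  intro rule
  induction rule using List.reverseRecOn with
  | nil =>
    intro row h
    have : row = [] := by cases row <;> simp_all
    subst this
    rw [popLoopA]
    rfl
  | append_singleton rs r ih =>
    intro row h
    rcases List.eq_nil_or_concat row with hrow | ⟨xs, x, rfl⟩
    · subst hrow; simp at h
    · rw [popLoopA]
      simp only [List.concat_eq_append] at h ⊢
      rw [PySem.List.pop?_last rs r, PySem.List.pop?_last xs x]
      dsimp only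
      have hlen : xs.length = rs.length := by simp at h; omega
      by_cases hx : PySem.Str.len x = r
      · rw [if_neg (by simpa using hx), ih xs hlen]
        have hiff : (xs.map PySem.Str.len ++ [PySem.Str.len x] = rs ++ [r]) ↔ (xs.map PySem.Str.len = rs) := by
          constructor
          · intro he
            exact (List.append_inj' he (by simp)).1
          · intro he; rw [he, hx]
        simp only [List.map_append, List.map_cons, List.map_nil]
        rw [if_congr hiff rfl rfl]
      · rw [if_pos (by simpa using hx)]
        rw [if_neg]
        intro he
        simp only [List.map_append, List.map_cons, List.map_nil] at he
        have := (List.append_inj' he (by simp)).2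
        simp at this
        exact hx this

-- run lengths B's scan produces, with k non-dot chars already pending
def g (k : Nat) : List Char → List Int
  | [] => if k ≠ 0 then [(k : Int)] else []
  | c :: r => if c = '.' then (if k ≠ 0 then [(k : Int)] else []) ++ g 0 r else g (k + 1) r

theorem foldl_scan (cs : List Char) : ∀ (runs0 : List Int) (k : Nat),
    (if (cs.foldl scanStep (runs0, (k : Int))).2 ≠ 0
     then (cs.foldl scanStep (runs0, (k : Int))).1 ++ [(cs.foldl scanStep (runs0, (k : Int))).2]
     else (cs.foldl scanStep (runs0, (k : Int))).1) = runs0 ++ g k cs := by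
  induction cs with
  | nil =>
    intro runs0 k
    by_cases hk : k = 0
    · subst hk; simp [g]
    · have hki : ((k : Int) ≠ 0) := by exact_mod_cast hk
      simp [g, hk, hki]
  | cons c r ih =>
    intro runs0 k
    by_cases hc : c = '.'
    · subst hc
      have hstep : scanStep (runs0, (k : Int)) '.' =
          ((if k ≠ 0 then runs0 ++ [(k : Int)] else runs0), ((0 : Nat) : Int)) := by
        by_cases hk : k = 0
        · simp [scanStep, hk]
        · have hki : ((k : Int) ≠ 0) := by exact_mod_cast hk
          simp [scanStep, hk, hki]
      rw [List.foldl_cons, hstep, ih]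
      simp only [g, if_pos rfl]
      by_cases hk : k = 0 <;> simp [hk]
    · have hstep : scanStep (runs0, (k : Int)) c = (runs0, ((k + 1 : Nat) : Int)) := by
        simp [scanStep, hc]
      rw [List.foldl_cons, hstep, ih]
      simp [g, hc]

theorem g_eq (cs : List Char) : ∀ (k : Nat) (h : List Char) (t : List (List Char)), split1 cs = h :: t →
    g k cs = (if k + h.length ≠ 0 then [((k + h.length : Nat) : Int)] else [])
      ++ (t.filter (· ≠ [])).map (fun p => (p.length : Int)) := by
  induction cs with
  | nil =>
    intro k h t hs
    simp only [split1] at hs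
    cases hs
    by_cases hk : k = 0 <;> simp [g, hk]
  | cons c r ih =>
    intro k h t hs
    cases hsr : split1 r with
    | nil => exact absurd hsr (split1_ne_nil r)
    | cons h' t' =>
      simp only [split1, hsr] at hs
      by_cases hc : c = '.'
      · rw [if_pos hc] at hs
        cases hs
        subst hc
        simp only [g, if_pos rfl]
        rw [ih 0 h' t' hsr]
        by_cases hh : h' = []
        · subst hh; simp
        · have hlen : h'.length ≠ 0 := by simpa using hh
          simp [List.filter_cons, hh, hlen]
      · rw [if_neg hc] at hs
        cases hs
        simp only [g, if_neg hc]
        rw [ih (k + 1) h' t hsr]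
        have harith : k + 1 + h'.length = k + (h'.length + 1) := by omega
        simp [harith]

-- ===== VERDICT (by name: the statement is the Claim_ definition above) =====
theorem legalRow_spec : Claim_equal_legalRow := by
  intro row rule _
  unfold Spec_legalRow legalRow legalRow_alt
  simp only []
  set cs := (PySem.Str.join "" row).toList with hcs
  have hsplit : PySem.Str.split? (PySem.Str.join "" row) "." =
      some ((split1 cs).map String.ofList) := by
    simp [PySem.Str.split?, PySem.Chars.split?, splitOn_eq_split1, hcs]
  rw [hsplit]
  simp only [Option.getD_some]
  rw [removeEmpties_eq]
  have hfil : ((split1 cs).map String.ofList).filter (· ≠ "") =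
      ((split1 cs).filter (· ≠ ([] : List Char))).map String.ofList := by
    rw [List.filter_map]
    congr 1
    apply List.filter_congr
    intro l _
    simp
  rw [hfil]
  set segs := (split1 cs).filter (· ≠ ([] : List Char)) with hsegs
  have hlenmap : (segs.map String.ofList).map PySem.Str.len = segs.map (fun p => (p.length : Int)) := by
    simp [PySem.Str.len]
  have hA : (if (segs.map String.ofList).length ≠ rule.length then (0 : Int)
      else popLoopA (segs.map String.ofList) rule)
      = if segs.map (fun p => (p.length : Int)) = rule then 1 else 0 := by
    by_cases hl : (segs.map String.ofList).length = rule.length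
    · rw [if_neg (by omega), popLoopA_eq rule _ hl, hlenmap]
    · rw [if_pos hl, if_neg]
      intro he
      apply hl
      have := congrArg List.length he
      simpa using this
  rw [hA]
  obtain ⟨h, t, hst⟩ : ∃ h t, split1 cs = h :: t := by
    cases hs : split1 cs with
    | nil => exact absurd hs (split1_ne_nil cs)
    | cons h t => exact ⟨h, t, rfl⟩
  have hB := foldl_scan cs [] 0
  simp only [Nat.cast_zero, List.nil_append] at hB
  rw [hB, g_eq cs 0 h t hst]
  have hsegs2 : segs.map (fun p => (p.length : Int)) =
      (if 0 + h.length ≠ 0 then [((0 + h.length : Nat) : Int)] else [])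
        ++ (t.filter (· ≠ [])).map (fun p => (p.length : Int)) := by
    rw [hsegs, hst]
    by_cases hh : h = []
    · subst hh; simp
    · have hlen : h.length ≠ 0 := by simpa using hh
      simp [List.filter_cons, hh, hlen]
  rw [← hsegs2]
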